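-- pv_equiv track=rewrite | github.com/BCCSU/bccsu-tools-public | bccsu/reports/excel_creator.py | get_contiguous_sequences
-- ===== SOURCE A (Python) =====
-- def get_contiguous_sequences(codes):
--     previous_index = [0 for _ in codes[0]]
--     final_position = len(codes[0]) - 1
--     groups = []
--     for col in codes:
--         previous_code = col[0]
--         start = 0
--         sub_groups = []
--         for pos, code in enumerate(col):
--             if pos != 0:
--                 if previous_code != code or previous_index[pos] != previous_index[pos - 1]:
--                     if pos - start > 1:
--                         sub_groups.append([start, pos - 1])
--                     start = pos
--             previous_code = code
--         if final_position - start > 0: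
--             sub_groups.append([start, final_position])
--         groups.append(sub_groups)
--         previous_index = col
--     return groups
-- ===== SOURCE B (Python) =====
-- def get_contiguous_sequences(codes):
--     # Boundary-table decomposition: per column, first tabulate all break
--     # positions, then build segments from (starts, ends) pairs in one pass.
--     n = len(codes[0])
--     prev = [0] * n
--     groups = []
--     for col in codes:
--         boundaries = [pos for pos in range(1, len(col))
--                       if col[pos] != col[pos - 1] or prev[pos] != prev[pos - 1]]
--         starts = [0] + boundaries
--         ends = [b - 1 for b in boundaries] + [n - 1]
--         groups.append([[s, e] for s, e in zip(starts, ends) if e - s >= 1])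
--         prev = col
--     return groups
-- ===== Notes on version B (the rewrite author's own statement) =====
-- stated objective: alternative
-- what changed: Replaces A's interleaved detect-and-emit inner loop (tracking previous_code/start state) with a per-column boundary table computed first, then a separate segment-building pass zipping starts with ends; same cost, different decomposition.
import Mathlib
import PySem

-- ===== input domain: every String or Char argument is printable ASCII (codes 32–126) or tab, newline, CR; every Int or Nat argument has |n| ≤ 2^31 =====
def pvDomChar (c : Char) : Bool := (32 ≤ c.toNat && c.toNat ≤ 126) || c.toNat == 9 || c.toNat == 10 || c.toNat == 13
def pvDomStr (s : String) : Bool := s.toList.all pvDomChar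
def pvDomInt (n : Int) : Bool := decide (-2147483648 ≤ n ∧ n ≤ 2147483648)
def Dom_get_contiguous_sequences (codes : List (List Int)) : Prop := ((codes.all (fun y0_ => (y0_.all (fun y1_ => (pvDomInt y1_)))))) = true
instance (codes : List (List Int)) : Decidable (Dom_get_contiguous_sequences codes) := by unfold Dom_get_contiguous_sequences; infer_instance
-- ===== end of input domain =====

-- B replaces A's interleaved detect-and-emit inner loop by a boundary table per
-- column followed by a separate segment-building zip pass (different decomposition,
-- same cost); return values agree on all of Pre_.

-- ===== PORT A =====
-- inner loop of A over one column: state (previous_code, start, sub_groups)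
def pvInnerA (previous_index col : List Int) : Int × Int × List (List Int) :=
  (PySem.List.enumerate col).foldl
    (fun st pc =>
      if pc.1 != 0 then
        if st.1 != pc.2 ||
           PySem.List.pyGetD previous_index pc.1 0 != PySem.List.pyGetD previous_index (pc.1 - 1) 0 then
          if pc.1 - st.2.1 > 1 then
            (pc.2, pc.1, st.2.2 ++ [[st.2.1, pc.1 - 1]])
          else (pc.2, pc.1, st.2.2)
        else (pc.2, st.2.1, st.2.2)
      else (pc.2, st.2.1, st.2.2))
    (PySem.List.pyGetD col 0 0, 0, ([] : List (List Int)))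

def get_contiguous_sequences (codes : List (List Int)) : List (List (List Int)) :=
  let previous_index := (PySem.List.pyGetD codes 0 []).map (fun _ => (0 : Int))
  let final_position : Int := ((PySem.List.pyGetD codes 0 []).length : Int) - 1
  (codes.foldl
    (fun (acc : List (List (List Int)) × List Int) col =>
      let st := pvInnerA acc.2 col
      let sub_groups :=
        if final_position - st.2.1 > 0 then st.2.2 ++ [[st.2.1, final_position]] else st.2.2
      (acc.1 ++ [sub_groups], col))
    (([] : List (List (List Int))), previous_index)).1

-- ===== PORT B =====
-- the break test of B's boundary comprehension
def pvBrk (prev col : List Int) (pos : Int) : Bool :=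
  PySem.List.pyGetD col pos 0 != PySem.List.pyGetD col (pos - 1) 0 ||
  PySem.List.pyGetD prev pos 0 != PySem.List.pyGetD prev (pos - 1) 0

-- one column of B: boundary table, then segments from zipped starts/ends
def pvInnerB (prev col : List Int) (n : Int) : List (List Int) :=
  let boundaries := (PySem.List.pyRange 1 (col.length : Int) 1).filter (pvBrk prev col)
  let starts : List Int := 0 :: boundaries
  let ends : List Int := boundaries.map (fun b => b - 1) ++ [n - 1]
  ((starts.zip ends).filter (fun se => se.2 - se.1 ≥ 1)).map (fun se => [se.1, se.2])

def get_contiguous_sequences_alt (codes : List (List Int)) : List (List (List Int)) :=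
  let n : Int := ((PySem.List.pyGetD codes 0 []).length : Int)
  (codes.foldl
    (fun (acc : List (List (List Int)) × List Int) col =>
      (acc.1 ++ [pvInnerB acc.2 col n], col))
    (([] : List (List (List Int))), List.replicate (PySem.List.pyGetD codes 0 []).length (0 : Int))).1

-- ===== PRECONDITION & SPEC =====
-- Pre_ excludes exactly the inputs where the Python A raises: empty codes / an empty
-- column (IndexError on col[0]) and any column with an equal adjacent pair at a
-- position beyond the previous column's length (IndexError on previous_index[pos]).
def Pre_get_contiguous_sequences (codes : List (List Int)) : Prop :=
  codes ≠ [] ∧ (∀ col ∈ codes, col ≠ []) ∧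
  ∀ p ∈ codes.zip codes.tail, ∀ pos ∈ List.range p.2.length,
    1 ≤ pos → p.2.getD pos 0 = p.2.getD (pos - 1) 0 → pos < p.1.length
instance (codes : List (List Int)) : Decidable (Pre_get_contiguous_sequences codes) := by
  unfold Pre_get_contiguous_sequences; infer_instance

def pvWitness_get_contiguous_sequences : List (List Int) := [[1, 1, 2], [3, 4, 4]]

def Spec_get_contiguous_sequences (codes : List (List Int)) (out : List (List (List Int))) : Prop := out = get_contiguous_sequences_alt codes
instance (codes : List (List Int)) (out : List (List (List Int))) : Decidable (Spec_get_contiguous_sequences codes out) := by unfold Spec_get_contiguous_sequences; infer_instance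

-- ===== CLAIM (what is proved, stated in full; the proofs are below) =====
def Claim_equal_get_contiguous_sequences : Prop := ∀ (codes : List (List Int)), Dom_get_contiguous_sequences codes → Pre_get_contiguous_sequences codes → Spec_get_contiguous_sequences codes (get_contiguous_sequences codes)

-- ===== LEMMAS AND PROOFS =====

-- A's inner loop, restated as structural recursion over the column suffix
def pvRunA (prev : List Int) : Int → Int → Int → List Int → Int × List (List Int)
  | _, _, s, [] => (s, [])
  | pc, k, s, c :: l =>
      if pc != c || PySem.List.pyGetD prev k 0 != PySem.List.pyGetD prev (k - 1) 0 then
        ((pvRunA prev c (k + 1) k l).1,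
         (if k - s > 1 then [[s, k - 1]] else []) ++ (pvRunA prev c (k + 1) k l).2)
      else pvRunA prev c (k + 1) s l

-- segments generated from a boundary list, with the final segment at n-1
def pvSegs (n : Int) : Int → List Int → List (List Int)
  | s, [] => if n - 1 - s > 0 then [[s, n - 1]] else []
  | s, b :: bs => (if b - s > 1 then [[s, b - 1]] else []) ++ pvSegs n b bs

theorem pvInnerA_foldl_eq (prev : List Int) (l : List Int) :
    ∀ (pc k s : Int) (acc : List (List Int)), 1 ≤ k →
      ((PySem.List.enumerate l k).foldl
        (fun st pc' =>
          if pc'.1 != 0 then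
            if st.1 != pc'.2 ||
               PySem.List.pyGetD prev pc'.1 0 != PySem.List.pyGetD prev (pc'.1 - 1) 0 then
              if pc'.1 - st.2.1 > 1 then
                (pc'.2, pc'.1, st.2.2 ++ [[st.2.1, pc'.1 - 1]])
              else (pc'.2, pc'.1, st.2.2)
            else (pc'.2, st.2.1, st.2.2)
          else (pc'.2, st.2.1, st.2.2))
        (pc, s, acc)).2 =
      ((pvRunA prev pc k s l).1, acc ++ (pvRunA prev pc k s l).2) := by
  induction l with
  | nil =>
      intro pc k s acc hk
      simp [PySem.List.enumerate_nil, pvRunA]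
  | cons c l ih =>
      intro pc k s acc hk
      have hk0 : (k != 0) = true := by simp; omega
      simp only [PySem.List.enumerate_cons, List.foldl_cons, hk0, if_true]
      by_cases hbrk : (pc != c || PySem.List.pyGetD prev k 0 != PySem.List.pyGetD prev (k - 1) 0) = true
      · rw [if_pos hbrk]
        by_cases he : k - s > 1
        · rw [if_pos he]
          rw [ih c (k + 1) k (acc ++ [[s, k - 1]]) (by omega)]
          simp only [pvRunA, hbrk, if_true, if_pos he]
          simp
        · rw [if_neg he]
          rw [ih c (k + 1) k acc (by omega)]
          simp only [pvRunA, hbrk, if_true, if_neg he]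
          simp
      · rw [if_neg hbrk]
        rw [ih c (k + 1) s acc (by omega)]
        simp only [pvRunA, hbrk]
        simp

theorem pvZip_eq_segs (n : Int) (bs : List Int) : ∀ (s : Int),
    ((((s :: bs).zip (bs.map (fun b => b - 1) ++ [n - 1])).filter
        (fun se => se.2 - se.1 ≥ 1)).map (fun se => [se.1, se.2])) =
    pvSegs n s bs := by
  intro s
  induction bs generalizing s with
  | nil =>
      simp only [List.map_nil, List.nil_append, List.zip_cons_cons, List.zip_nil_right]
      by_cases h : n - 1 - s ≥ 1
      · rw [List.filter_cons_of_pos (by simpa using h)]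
        simp only [pvSegs, if_pos (show n - 1 - s > 0 by omega)]
        simp
      · rw [List.filter_cons_of_neg (by simpa using h)]
        simp only [pvSegs, if_neg (show ¬ (n - 1 - s > 0) by omega)]
        simp
  | cons b bs ih =>
      simp only [List.map_cons, List.cons_append, List.zip_cons_cons]
      by_cases h : b - 1 - s ≥ 1
      · rw [List.filter_cons_of_pos (by simpa using h)]
        simp only [List.map_cons, pvSegs, ih b]
        rw [if_pos (show b - s > 1 by omega)]
        simp
      · rw [List.filter_cons_of_neg (by simpa using h)]
        simp only [pvSegs, ih b]
        rw [if_neg (show ¬ (b - s > 1) by omega), List.nil_append]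

theorem pvRunA_segs (prev : List Int) (n : Int) (col : List Int) :
    ∀ (l : List Int) (k : Nat), 1 ≤ k → col.drop k = l → ∀ (s : Int),
      (pvRunA prev (PySem.List.pyGetD col ((k : Int) - 1) 0) (k : Int) s l).2 ++
        (if (n - 1) - (pvRunA prev (PySem.List.pyGetD col ((k : Int) - 1) 0) (k : Int) s l).1 > 0
         then [[(pvRunA prev (PySem.List.pyGetD col ((k : Int) - 1) 0) (k : Int) s l).1, n - 1]]
         else []) =
      pvSegs n s ((PySem.List.pyRange (k : Int) (col.length : Int) 1).filter (pvBrk prev col)) := by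
  intro l
  induction l with
  | nil =>
      intro k hk hd s
      have hlen : col.length ≤ k := by
        have h := congrArg List.length hd
        rw [List.length_drop] at h
        simp only [List.length_nil] at h
        omega
      rw [PySem.List.pyRange_one_eq_nil (by exact_mod_cast hlen)]
      simp [pvRunA, pvSegs]
  | cons c l ih =>
      intro k hk hd s
      have hklt : k < col.length := by
        have h := congrArg List.length hd
        rw [List.length_drop] at h
        simp only [List.length_cons] at h
        omega
      have hc : PySem.List.pyGetD col (k : Int) 0 = c := by
        have h1 : (List.drop k col)[0]? = col[k + 0]? := List.getElem?_drop
        rw [hd] at h1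
        have h0 : col[k]? = some c := by simpa using h1.symm
        rw [PySem.List.pyGetD_natCast, List.getD_eq_getElem?_getD, h0]
        rfl
      have hd' : col.drop (k + 1) = l := by
        rw [← List.tail_drop, hd, List.tail_cons]
      have hcast : (((k + 1 : Nat) : Int)) - 1 = (k : Int) := by push_cast; ring
      have hcast2 : (((k + 1 : Nat) : Int)) = (k : Int) + 1 := by push_cast; ring
      have ihk := ih (k + 1) (by omega) hd'
      rw [hcast, hcast2, hc] at ihk
      rw [PySem.List.pyRange_one_cons (by exact_mod_cast hklt), List.filter_cons]
      have hbne : (PySem.List.pyGetD col ((k : Int) - 1) 0 != c) = (c != PySem.List.pyGetD col ((k : Int) - 1) 0) := by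
        rw [bne_comm]
      have hbrkeq : pvBrk prev col (k : Int) =
          (PySem.List.pyGetD col ((k : Int) - 1) 0 != c ||
           PySem.List.pyGetD prev (k : Int) 0 != PySem.List.pyGetD prev ((k : Int) - 1) 0) := by
        rw [pvBrk, hc, hbne]
      by_cases hb : (PySem.List.pyGetD col ((k : Int) - 1) 0 != c ||
           PySem.List.pyGetD prev (k : Int) 0 != PySem.List.pyGetD prev ((k : Int) - 1) 0) = true
      · rw [hbrkeq, if_pos hb]
        have hA : pvRunA prev (PySem.List.pyGetD col ((k : Int) - 1) 0) (k : Int) s (c :: l) =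
            ((pvRunA prev c ((k : Int) + 1) (k : Int) l).1,
             (if (k : Int) - s > 1 then [[s, (k : Int) - 1]] else []) ++
               (pvRunA prev c ((k : Int) + 1) (k : Int) l).2) := by
          simp only [pvRunA]
          rw [if_pos hb]
        rw [hA, pvSegs, ← ihk (k : Int)]
        by_cases he : (k : Int) - s > 1
        · rw [if_pos he]
          simp
        · rw [if_neg he]
          simp
      · rw [hbrkeq, if_neg hb]
        have hA : pvRunA prev (PySem.List.pyGetD col ((k : Int) - 1) 0) (k : Int) s (c :: l) =
            pvRunA prev c ((k : Int) + 1) s l := by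
          simp only [pvRunA]
          rw [if_neg hb]
        rw [hA]
        exact ihk s

-- one column: A's loop plus final emission equals B's boundary construction
theorem pvCol_eq (prev col : List Int) (n : Int) :
    (let st := pvInnerA prev col
     if (n - 1) - st.2.1 > 0 then st.2.2 ++ [[st.2.1, n - 1]] else st.2.2) =
    pvInnerB prev col n := by
  have hB : pvInnerB prev col n =
      pvSegs n 0 ((PySem.List.pyRange 1 (col.length : Int) 1).filter (pvBrk prev col)) := by
    unfold pvInnerB
    exact pvZip_eq_segs n _ 0
  cases col with
  | nil =>
      rw [hB, PySem.List.pyRange_one_eq_nil (by norm_num)]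
      simp [pvInnerA, pvSegs, PySem.List.enumerate_nil]
  | cons c t =>
      rw [hB]
      have hA2 : (pvInnerA prev (c :: t)).2 = ((pvRunA prev c 1 0 t).1, (pvRunA prev c 1 0 t).2) := by
        have h := pvInnerA_foldl_eq prev t c 1 0 [] (by norm_num)
        rw [pvInnerA, PySem.List.enumerate_cons, List.foldl_cons]
        simpa using h
      have hdrop : (c :: t).drop 1 = t := rfl
      have hseg := pvRunA_segs prev n (c :: t) t 1 (le_refl 1) hdrop 0
      simp only [Nat.cast_one] at hseg
      rw [show (1 : Int) - 1 = 0 from by ring, PySem.List.pyGetD_zero_cons] at hseg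
      dsimp only
      rw [hA2]
      dsimp only
      rw [← hseg]
      split_ifs <;> simp

-- the whole fold: both per-column bodies agree, prev is threaded identically
theorem pvFold_eq (n : Int) (codes : List (List Int)) :
    ∀ (prev : List Int) (g : List (List (List Int))),
      (codes.foldl
        (fun (acc : List (List (List Int)) × List Int) col =>
          let st := pvInnerA acc.2 col
          let sub_groups :=
            if (n - 1) - st.2.1 > 0 then st.2.2 ++ [[st.2.1, n - 1]] else st.2.2
          (acc.1 ++ [sub_groups], col)) (g, prev)).1 =
      (codes.foldl
        (fun (acc : List (List (List Int)) × List Int) col =>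
          (acc.1 ++ [pvInnerB acc.2 col n], col)) (g, prev)).1 := by
  induction codes with
  | nil => intro prev g; rfl
  | cons col codes ih =>
      intro prev g
      simp only [List.foldl_cons]
      have h := pvCol_eq prev col n
      dsimp only at h ⊢
      rw [h]
      exact ih col (g ++ [pvInnerB prev col n])

-- ===== VERDICT (by name: the statement is the Claim_ definition above) =====
theorem get_contiguous_sequences_spec : Claim_equal_get_contiguous_sequences := by
  intro codes _ _
  unfold Spec_get_contiguous_sequences get_contiguous_sequences get_contiguous_sequences_alt
  dsimp only
  rw [show (PySem.List.pyGetD codes 0 []).map (fun _ => (0 : Int)) =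
        List.replicate (PySem.List.pyGetD codes 0 []).length (0 : Int) from by
      simp [List.map_const']]
  exact pvFold_eq ((PySem.List.pyGetD codes 0 []).length : Int) codes
    (List.replicate (PySem.List.pyGetD codes 0 []).length (0 : Int)) []
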